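-- pv_equiv track=rewrite | github.com/PowerLichen/CodeTest | Programmers-py/43164.py | solution
-- ===== SOURCE A (Python) =====
-- from collections import defaultdict
--
-- def solution(tickets):
--     graph = defaultdict(list)
--     for src, dest in tickets:
--         graph[src].append(dest)
--
--     for key in graph.keys():
--         graph[key].sort(reverse=True)
--
--     answer = list()
--     stack = ["ICN"]
--     while stack:
--         cur = stack[-1]
--         if len(graph[cur]) > 0:
--             stack.append(graph[cur].pop())
--         else:
--             answer.append(stack.pop())
--
--     answer.reverse()
--     return answer
-- ===== SOURCE B (Python) =====
-- from collections import defaultdict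
--
-- def solution(tickets):
--     graph = defaultdict(list)
--     for src, dest in tickets:
--         graph[src].append(dest)
--
--     for key in graph.keys():
--         graph[key].sort(reverse=True)
--
--     answer = []
--
--     def visit(node):
--         while graph[node]:
--             visit(graph[node].pop())
--         answer.append(node)
--
--     visit("ICN")
--     answer.reverse()
--     return answer
-- ===== Notes on version B (the rewrite author's own statement) =====
-- stated objective: alternative
-- what changed: The explicit stack loop of Hierholzer's algorithm is replaced by a recursive depth-first visit(node) that pops edges and recurses, appending node in post-order; graph building and reverse-sorting are unchanged, so the edge-consumption order and hence the answer are identical.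
import Mathlib
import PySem

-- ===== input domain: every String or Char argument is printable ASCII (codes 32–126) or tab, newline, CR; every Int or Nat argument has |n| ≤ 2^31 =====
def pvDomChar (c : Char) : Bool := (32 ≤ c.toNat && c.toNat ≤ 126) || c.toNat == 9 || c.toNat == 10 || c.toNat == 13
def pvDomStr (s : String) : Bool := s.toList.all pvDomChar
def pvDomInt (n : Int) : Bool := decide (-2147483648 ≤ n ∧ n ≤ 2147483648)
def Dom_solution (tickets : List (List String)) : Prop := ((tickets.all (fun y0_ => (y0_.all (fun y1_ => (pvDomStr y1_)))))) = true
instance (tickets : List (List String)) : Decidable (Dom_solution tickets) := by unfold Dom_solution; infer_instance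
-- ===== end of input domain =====

-- B replaces A's explicit-stack Hierholzer loop by a recursive post-order visit; same graph build and reverse sort, same answer.

-- ===== PORT A =====
-- Shared by both ports (the two Pythons share this code verbatim): build the
-- defaultdict adjacency lists in ticket order, then sort each list descending.
def buildGraph (tickets : List (List String)) : PySem.Dict String (List String) :=
  let g := tickets.foldl (fun g t =>
    match t with
    | [src, dest] => g.insert src (g.getD src [] ++ [dest])  -- graph[src].append(dest) on a defaultdict(list)
    | _ => g) PySem.Dict.empty                                -- tickets of length ≠ 2 raise in Python: outside Pre_
  PySem.Dict.mk (g.items.map (fun p => (p.1, PySem.List.sorted p.2 (fun x => x) true)))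

-- A's while-stack loop; fuel 2*|tickets|+1 bounds the exact number of iterations (each
-- iteration pops an edge or pops the stack), so the guard is a totality device only.
def loopA : Nat → List String → PySem.Dict String (List String) → List String → List String
  | 0, _, _, ans => ans
  | _ + 1, [], _, ans => ans
  | f + 1, cur :: rest, g, ans =>
    match (g.getD cur []).getLast? with
    | some x => loopA f (x :: cur :: rest) (g.insert cur (g.getD cur []).dropLast) ans
    | none => loopA f rest g (ans ++ [cur])

def solution (tickets : List (List String)) : List String :=
  (loopA (2 * tickets.length + 1) ["ICN"] (buildGraph tickets) []).reverse

-- ===== PORT B =====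
-- B's recursive visit(node): while graph[node] is non-empty pop its last element and
-- recurse, then append node; returns the final (graph, answer) state.  Same fuel bound.
def visit : Nat → String → PySem.Dict String (List String) → List String →
    PySem.Dict String (List String) × List String
  | 0, _, g, ans => (g, ans)
  | f + 1, node, g, ans =>
    match (g.getD node []).getLast? with
    | none => (g, ans ++ [node])
    | some x =>
      let p := visit f x (g.insert node (g.getD node []).dropLast) ans
      visit f node p.1 p.2

def solution_alt (tickets : List (List String)) : List String :=
  ((visit (2 * tickets.length + 1) "ICN" (buildGraph tickets) []).2).reverse

-- ===== PRECONDITION & SPEC =====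
-- Pre_ excludes exactly the inputs where Python raises: a ticket that is not a
-- two-element [src, dest] list makes 'for src, dest in tickets' raise ValueError.
def Pre_solution (tickets : List (List String)) : Prop := ∀ t ∈ tickets, t.length = 2
instance (tickets : List (List String)) : Decidable (Pre_solution tickets) := by unfold Pre_solution; infer_instance

def pvWitness_solution : List (List String) := [["ICN", "JFK"], ["JFK", "ICN"]]

def Spec_solution (tickets : List (List String)) (out : List String) : Prop := out = solution_alt tickets
instance (tickets : List (List String)) (out : List String) : Decidable (Spec_solution tickets out) := by unfold Spec_solution; infer_instance

-- ===== CLAIM (what is proved, stated in full; the proofs are below) =====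
def Claim_equal_solution : Prop := ∀ (tickets : List (List String)), Dom_solution tickets → Pre_solution tickets → Spec_solution tickets (solution tickets)

-- ===== LEMMAS AND PROOFS =====

-- total number of remaining edges in the adjacency structure
def edges (g : PySem.Dict String (List String)) : Nat :=
  (g.items.map (fun p => p.2.length)).sum

lemma sum_replace : ∀ (its : List (String × List String)) (k : String) (v w : List String),
    (its.map Prod.fst).Nodup →
    its.find? (fun p => p.1 == k) = some (k, w) →
    ((its.map (fun p => if (p.1 == k) = true then (k, v) else p)).map (fun p => p.2.length)).sum
      + w.length
      = (its.map (fun p => p.2.length)).sum + v.length := by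
  intro its k v w hnd hf
  induction its with
  | nil => simp at hf
  | cons a rest ih =>
    rw [List.map_cons] at hnd
    obtain ⟨hknot, hnd'⟩ := List.nodup_cons.mp hnd
    by_cases hk : (a.1 == k) = true
    · have hpos : (a :: rest).find? (fun p => p.1 == k) = some a := by simp [hk]
      rw [hpos] at hf
      obtain rfl : a = (k, w) := by injection hf
      have hk' : (k : String) ∉ rest.map Prod.fst := by simpa using hknot
      have hrest : rest.map (fun p => if (p.1 == k) = true then (k, v) else p) = rest := by
        calc rest.map (fun p => if (p.1 == k) = true then (k, v) else p)
            = rest.map id := by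
              apply List.map_congr_left
              intro p hp
              have hne : p.1 ≠ k := by
                intro h
                exact hk' (h ▸ List.mem_map_of_mem hp)
              simp [hne]
          _ = rest := List.map_id rest
      simp only [List.map_cons, List.sum_cons, hrest]
      simp
      omega
    · have hneg : (a :: rest).find? (fun p => p.1 == k) = rest.find? (fun p => p.1 == k) := by
        simp [hk]
      rw [hneg] at hf
      have := ih hnd' hf
      have hk' : ¬ ((a.1 == k) = true) := hk
      simp only [List.map_cons, List.sum_cons, if_neg hk']
      omega

lemma edges_insert_getD (g : PySem.Dict String (List String)) (k : String) (v : List String)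
    (hnd : g.keys.Nodup) :
    edges (g.insert k v) + (g.getD k []).length = edges g + v.length := by
  have hndi : (g.items.map Prod.fst).Nodup := by
    simpa [PySem.Dict.keys] using hnd
  by_cases hc : g.contains k = true
  · have hget : ∃ w, g.get? k = some w := by
      rw [PySem.Dict.contains_eq_isSome_get?] at hc
      exact Option.isSome_iff_exists.mp hc
    obtain ⟨w, hw⟩ := hget
    have hfind : g.items.find? (fun p => p.1 == k) = some (k, w) := by
      unfold PySem.Dict.get? at hw
      obtain ⟨⟨p1, p2⟩, hp, hp2⟩ := Option.map_eq_some_iff.mp hw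
      have h1 := List.find?_some hp
      have h1' : p1 = k := by simpa using h1
      simp only at hp2
      rw [h1', hp2] at hp
      exact hp
    have hgd : g.getD k [] = w := by simp [PySem.Dict.getD, hw]
    have hsum := sum_replace g.items k v w hndi hfind
    rw [hgd]
    unfold edges
    rw [PySem.Dict.items_insert_of_contains g v hc]
    exact hsum
  · have hc' : g.contains k = false := by simpa using hc
    rw [PySem.Dict.getD_of_not_contains g [] hc']
    simp [edges, PySem.Dict.items_insert_of_not_contains g v hc']

lemma edges_pop (g : PySem.Dict String (List String)) (k : String)
    (hnd : g.keys.Nodup) (hne : g.getD k [] ≠ []) :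
    edges (g.insert k (g.getD k []).dropLast) + 1 = edges g := by
  have h := edges_insert_getD g k (g.getD k []).dropLast hnd
  have hlen : (g.getD k []).dropLast.length = (g.getD k []).length - 1 := by
    simp [List.length_dropLast]
  have hpos : 0 < (g.getD k []).length := List.length_pos_iff.mpr hne
  omega

-- the recursive visit never adds edges and keeps the keys nodup
lemma visit_inv : ∀ (f : Nat) (n : String) (g : PySem.Dict String (List String)) (ans : List String),
    g.keys.Nodup →
    (visit f n g ans).1.keys.Nodup ∧ edges (visit f n g ans).1 ≤ edges g := by
  intro f
  induction f with
  | zero => intro n g ans h; exact ⟨h, le_rfl⟩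
  | succ f ih =>
    intro n g ans h
    cases hl : (g.getD n []).getLast? with
    | none =>
      simp only [visit, hl]
      exact ⟨h, le_rfl⟩
    | some x =>
      have hne : g.getD n [] ≠ [] := by
        intro hnil; rw [hnil] at hl; simp at hl
      have hnd' : (g.insert n (g.getD n []).dropLast).keys.Nodup :=
        PySem.Dict.nodup_keys_insert _ _ _ h
      have hep := edges_pop g n h hne
      obtain ⟨h1, h2⟩ := ih x (g.insert n (g.getD n []).dropLast) ans hnd'
      obtain ⟨h3, h4⟩ := ih n (visit f x (g.insert n (g.getD n []).dropLast) ans).1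
        (visit f x (g.insert n (g.getD n []).dropLast) ans).2 h1
      refine ⟨?_, ?_⟩ <;> simp only [visit, hl] <;> [exact h3; omega]

lemma loopA_nil : ∀ (f : Nat) (g : PySem.Dict String (List String)) (ans : List String),
    loopA f [] g ans = ans := by
  intro f g ans; cases f <;> rfl

lemma loopA_succ : ∀ (f : Nat) (stack : List String) (g : PySem.Dict String (List String))
    (ans : List String), g.keys.Nodup → 2 * edges g + stack.length ≤ f →
    loopA (f + 1) stack g ans = loopA f stack g ans := by
  intro f
  induction f with
  | zero =>
    intro stack g ans _ hb
    have : stack = [] := by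
      cases stack with
      | nil => rfl
      | cons a b => simp at hb
    subst this
    simp [loopA_nil]
  | succ f ih =>
    intro stack g ans hnd hb
    cases stack with
    | nil => simp [loopA_nil]
    | cons cur rest =>
      cases hl : (g.getD cur []).getLast? with
      | none =>
        simp only [loopA, hl]
        exact ih rest g (ans ++ [cur]) hnd (by simp at hb ⊢; omega)
      | some x =>
        have hne : g.getD cur [] ≠ [] := by
          intro hnil; rw [hnil] at hl; simp at hl
        have hep := edges_pop g cur hnd hne
        simp only [loopA, hl]
        exact ih (x :: cur :: rest) (g.insert cur (g.getD cur []).dropLast) ans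
          (PySem.Dict.nodup_keys_insert _ _ _ hnd) (by simp at hb ⊢; omega)

lemma loopA_add : ∀ (k f : Nat) (stack : List String) (g : PySem.Dict String (List String))
    (ans : List String), g.keys.Nodup → 2 * edges g + stack.length ≤ f →
    loopA (f + k) stack g ans = loopA f stack g ans := by
  intro k
  induction k with
  | zero => intro f stack g ans _ _; rfl
  | succ k ih =>
    intro f stack g ans hnd hb
    have h1 : f + (k + 1) = (f + k) + 1 := by omega
    rw [h1, loopA_succ (f + k) stack g ans hnd (by omega), ih f stack g ans hnd hb]

lemma loopA_mono (f f' : Nat) (stack : List String) (g : PySem.Dict String (List String))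
    (ans : List String) (hnd : g.keys.Nodup) (hb : 2 * edges g + stack.length ≤ f)
    (hle : f ≤ f') : loopA f' stack g ans = loopA f stack g ans := by
  obtain ⟨k, rfl⟩ := Nat.exists_eq_add_of_le hle
  exact loopA_add k f stack g ans hnd hb

-- MAIN: the iterative stack loop with cur on top computes exactly what visiting cur
-- recursively and then continuing the loop on the remaining stack computes.
lemma loopA_eq_visit : ∀ (f2 f1 : Nat) (cur : String) (stack : List String)
    (g : PySem.Dict String (List String)) (ans : List String), g.keys.Nodup →
    2 * edges g + stack.length + 1 ≤ f1 → 2 * edges g + 1 ≤ f2 →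
    loopA f1 (cur :: stack) g ans
      = loopA f1 stack (visit f2 cur g ans).1 (visit f2 cur g ans).2 := by
  intro f2
  induction f2 with
  | zero => intro f1 cur stack g ans _ _ hb2; omega
  | succ f2 ih =>
    intro f1 cur stack g ans hnd hb1 hb2
    obtain ⟨f1', rfl⟩ : ∃ f1', f1 = f1' + 1 := ⟨f1 - 1, by omega⟩
    cases hl : (g.getD cur []).getLast? with
    | none =>
      simp only [loopA, visit, hl]
      exact (loopA_mono f1' (f1' + 1) stack g (ans ++ [cur]) hnd (by simp at hb1 ⊢; omega)
        (by omega)).symm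
    | some x =>
      have hne : g.getD cur [] ≠ [] := by
        intro hnil; rw [hnil] at hl; simp at hl
      have hep := edges_pop g cur hnd hne
      have hnd' : (g.insert cur (g.getD cur []).dropLast).keys.Nodup :=
        PySem.Dict.nodup_keys_insert _ _ _ hnd
      set g' := g.insert cur (g.getD cur []).dropLast with hg'
      obtain ⟨hndp, hedp⟩ := visit_inv f2 x g' ans hnd'
      set p := visit f2 x g' ans with hp
      obtain ⟨hndq, hedq⟩ := visit_inv f2 cur p.1 p.2 hndp
      set q := visit f2 cur p.1 p.2 with hq
      have step1 : loopA (f1' + 1) (cur :: stack) g ans = loopA f1' (x :: cur :: stack) g' ans := by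
        simp only [loopA, hl, hg']
      have step2 : loopA f1' (x :: cur :: stack) g' ans = loopA f1' (cur :: stack) p.1 p.2 :=
        ih f1' x (cur :: stack) g' ans hnd' (by simp; omega) (by omega)
      have step3 : loopA f1' (cur :: stack) p.1 p.2 = loopA f1' stack q.1 q.2 :=
        ih f1' cur stack p.1 p.2 hndp (by omega) (by omega)
      have hv : visit (f2 + 1) cur g ans = q := by
        simp only [visit, hl]
        rw [hq, hp, hg']
      rw [step1, step2, step3, hv]
      exact (loopA_mono f1' (f1' + 1) stack q.1 q.2 hndq (by omega) (by omega)).symm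

-- the built graph has nodup keys and at most |tickets| edges
lemma build_inv : ∀ (ts : List (List String)) (g : PySem.Dict String (List String)),
    g.keys.Nodup →
    (ts.foldl (fun g t =>
      match t with
      | [src, dest] => g.insert src (g.getD src [] ++ [dest])
      | _ => g) g).keys.Nodup ∧
    edges (ts.foldl (fun g t =>
      match t with
      | [src, dest] => g.insert src (g.getD src [] ++ [dest])
      | _ => g) g) ≤ edges g + ts.length := by
  intro ts
  induction ts with
  | nil => intro g h; exact ⟨h, by simp⟩
  | cons t rest ih =>
    intro g h
    match t with
    | [] => obtain ⟨a, b⟩ := ih g h; exact ⟨a, by simpa using Nat.le_succ_of_le b⟩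
    | [s] => obtain ⟨a, b⟩ := ih g h; exact ⟨a, by simpa using Nat.le_succ_of_le b⟩
    | s :: d :: e :: r =>
      obtain ⟨a, b⟩ := ih g h; exact ⟨a, by simpa using Nat.le_succ_of_le b⟩
    | [s, d] =>
      have hnd' := PySem.Dict.nodup_keys_insert g s (g.getD s [] ++ [d]) h
      have he := edges_insert_getD g s (g.getD s [] ++ [d]) h
      obtain ⟨a, b⟩ := ih (g.insert s (g.getD s [] ++ [d])) hnd'
      refine ⟨a, ?_⟩
      simp only [List.foldl_cons, List.length_cons]
      simp at he
      omega

lemma buildGraph_inv (tickets : List (List String)) :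
    (buildGraph tickets).keys.Nodup ∧ edges (buildGraph tickets) ≤ tickets.length := by
  obtain ⟨a, b⟩ := build_inv tickets PySem.Dict.empty (by exact PySem.Dict.nodup_keys_empty)
  have h0 : edges PySem.Dict.empty = 0 := by simp [edges, PySem.Dict.empty]
  have hmap : ∀ (its : List (String × List String)),
      ((its.map (fun p => (p.1, PySem.List.sorted p.2 (fun x => x) true))).map
          (fun p => p.2.length)).sum
        = (its.map (fun p => p.2.length)).sum := by
    intro its
    rw [List.map_map]
    apply congrArg
    apply List.map_congr_left
    intro p hp
    simp [PySem.List.length_sorted]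
  constructor
  · simp only [buildGraph]
    simpa [PySem.Dict.keys, List.map_map, Function.comp] using a
  · simp only [buildGraph, edges] at b ⊢
    rw [hmap]
    simp only [edges] at h0
    omega

-- ===== VERDICT (by name: the statement is the Claim_ definition above) =====
theorem solution_spec : Claim_equal_solution := by
  intro tickets _ _
  unfold Spec_solution solution solution_alt
  obtain ⟨hnd, hed⟩ := buildGraph_inv tickets
  rw [show ["ICN"] = "ICN" :: ([] : List String) from rfl]
  rw [loopA_eq_visit (2 * tickets.length + 1) (2 * tickets.length + 1) "ICN" []
    (buildGraph tickets) [] hnd (by simp; omega) (by omega)]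
  rw [loopA_nil]
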